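-- pv_equiv track=rewrite | github.com/Daniel-DeGuire/Python_MIT_Class | Project1.py | can_be_formed_with_wildcard
-- ===== SOURCE A (Python) =====
-- def can_be_formed_with_wildcard(word, hand):
--     """
--     Check if the word can be formed from the given hand, allowing '*' to substitute any vowel.
--     """
--     hand_copy = hand.copy()  # Work with a copy of the hand
--
--     for letter in word:
--         # If the letter is in the hand, reduce its count
--         if hand_copy.get(letter, 0) > 0:
--             hand_copy[letter] -= 1
--         # If the letter is a vowel and the hand contains a wildcard, use the wildcard
--         elif '*' in hand_copy and letter in 'aeiou':  # '*' can only replace vowels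
--             hand_copy['*'] -= 1  # Use wildcard to substitute for a vowel
--         else:
--             return False  # The letter is either not in the hand, or it cannot be replaced
--
--     # Ensure the wildcard usage does not go negative (only one wildcard can be used)
--     if hand_copy.get('*', 0) < 0:
--         return False  # More than one wildcard usage, which is not allowed
--
--     return True
-- ===== SOURCE B (Python) =====
-- def can_be_formed_with_wildcard(word, hand):
--     """
--     Check if the word can be formed from the given hand, allowing '*' to substitute any vowel.
--
--     Aggregate reformulation: instead of simulating the hand letter by letter,
--     count each distinct letter once, reject any consonant shortfall outright,
--     and total the wildcard demand (literal '*' characters plus every vowel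
--     shortfall) against the '*' supply in the hand.
--     """
--     if any(c != '*' and c not in 'aeiou'
--            and word.count(c) > max(hand.get(c, 0), 0)
--            for c in set(word)):
--         return False
--     wild = word.count('*')
--     for v in 'aeiou':
--         wild += max(word.count(v) - max(hand.get(v, 0), 0), 0)
--     if '*' in hand:
--         return wild <= hand['*']
--     return wild == 0
-- ===== Notes on version B (the rewrite author's own statement) =====
-- stated objective: alternative
-- what changed: Replaces A's letter-by-letter simulation of a mutable hand copy with early returns by a per-distinct-letter count aggregation: any consonant shortfall rejects outright, and the total wildcard demand (literal '*' characters plus every vowel shortfall) is compared once against the '*' supply.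
import Mathlib
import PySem

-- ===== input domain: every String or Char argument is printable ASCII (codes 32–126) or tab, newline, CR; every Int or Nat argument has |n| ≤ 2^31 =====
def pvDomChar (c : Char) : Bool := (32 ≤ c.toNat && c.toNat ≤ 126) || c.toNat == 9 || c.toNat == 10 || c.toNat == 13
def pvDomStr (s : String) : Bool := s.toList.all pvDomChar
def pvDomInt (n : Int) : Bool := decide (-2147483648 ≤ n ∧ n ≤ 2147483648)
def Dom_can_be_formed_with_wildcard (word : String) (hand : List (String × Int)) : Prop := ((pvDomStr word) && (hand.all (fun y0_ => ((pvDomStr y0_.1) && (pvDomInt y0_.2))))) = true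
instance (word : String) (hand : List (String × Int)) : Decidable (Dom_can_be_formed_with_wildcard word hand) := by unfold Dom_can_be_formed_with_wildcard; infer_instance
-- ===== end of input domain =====

-- B replaces A's letter-by-letter hand simulation by a per-distinct-letter count
-- aggregation (consonant shortfalls reject, vowel shortfalls plus literal '*'
-- are totalled against the '*' supply); objective: alternative (same cost).

-- ===== PORT A =====

-- single-char membership test 'letter in "aeiou"' (exact for a 1-char string)
def pvVowels : List Char := ['a', 'e', 'i', 'o', 'u']

-- the for-loop of A: returns none on 'return False', else the final hand_copy
def pvLoopA : List Char → PySem.Dict String Int → Option (PySem.Dict String Int)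
  | [], h => some h
  | c :: rest, h =>
    if PySem.Dict.getD h (String.ofList [c]) 0 > 0 then
      -- hand_copy[letter] -= 1
      pvLoopA rest (PySem.Dict.modify h (String.ofList [c]) 0 (· - 1))
    else if (PySem.Dict.get? h "*").isSome && pvVowels.contains c then
      -- hand_copy['*'] -= 1
      pvLoopA rest (PySem.Dict.modify h "*" 0 (· - 1))
    else
      none

def can_be_formed_with_wildcard (word : String) (hand : List (String × Int)) : Bool :=
  match pvLoopA word.toList (PySem.Dict.mk hand) with
  | none => false
  | some h => !(PySem.Dict.getD h "*" 0 < 0)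

-- ===== PORT B =====

-- max(hand.get(c, 0), 0) for a 1-char key
def pvHave (hand : PySem.Dict String Int) (c : Char) : Int :=
  max (PySem.Dict.getD hand (String.ofList [c]) 0) 0

-- the wild accumulation loop of B: word.count('*') plus each vowel's shortfall
def pvWild (l : List Char) (hand : PySem.Dict String Int) : Int :=
  pvVowels.foldl (fun w v => w + max ((l.count v : Int) - pvHave hand v) 0)
    ((l.count '*' : Int))

def pvAltCore (l : List Char) (hand : PySem.Dict String Int) : Bool :=
  if (PySem.Set.ofList l).any (fun c =>
      c != '*' && !(pvVowels.contains c) && ((l.count c : Int) > pvHave hand c)) then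
    false
  else
    match PySem.Dict.get? hand "*" with
    | some star => pvWild l hand ≤ star
    | none => pvWild l hand == 0

def can_be_formed_with_wildcard_alt (word : String) (hand : List (String × Int)) : Bool :=
  pvAltCore word.toList (PySem.Dict.mk hand)

-- ===== PRECONDITION & SPEC =====
def Spec_can_be_formed_with_wildcard (word : String) (hand : List (String × Int)) (out : Bool) : Prop := out = can_be_formed_with_wildcard_alt word hand
instance (word : String) (hand : List (String × Int)) (out : Bool) : Decidable (Spec_can_be_formed_with_wildcard word hand out) := by unfold Spec_can_be_formed_with_wildcard; infer_instance

-- ===== CLAIM (what is proved, stated in full; the proofs are below) =====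
def Claim_equal_can_be_formed_with_wildcard : Prop := ∀ (word : String) (hand : List (String × Int)), Dom_can_be_formed_with_wildcard word hand → Spec_can_be_formed_with_wildcard word hand (can_be_formed_with_wildcard word hand)


-- ===== LEMMAS AND PROOFS =====

theorem str1_inj {a b : Char} : (String.ofList [a] = String.ofList [b]) ↔ a = b := by
  constructor
  · intro h; simpa using congrArg String.toList h
  · intro h; rw [h]

theorem star_str : String.ofList ['*'] = "*" := by decide

theorem str1_ne_star {d : Char} (h : d ≠ '*') : String.ofList [d] ≠ "*" := by
  intro he
  exact h (str1_inj.mp (he.trans star_str.symm))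

theorem bool_eq_of_iff {a b : Bool} (h : (a = true) ↔ (b = true)) : a = b := by
  cases a <;> cases b <;> simp_all

theorem cnt_ne {a b : Char} (l : List Char) (h : a ≠ b) : (b :: l).count a = l.count a := by
  rw [List.count_cons_of_ne h.symm]

-- the mathematical content of pvAltCore, as a Prop
def pvGood (l : List Char) (h : PySem.Dict String Int) : Prop :=
  (∀ c ∈ l, c ∉ pvVowels → c ≠ '*' → ((l.count c : Int)) ≤ pvHave h c) ∧
  pvWild l h ≤ PySem.Dict.getD h "*" 0

theorem pvWild_sum (l : List Char) (h : PySem.Dict String Int) :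
    pvWild l h = (l.count '*' : Int)
      + (pvVowels.map (fun v => max ((l.count v : Int) - pvHave h v) 0)).sum := by
  simp [pvWild, pvVowels]
  ring

theorem pvHave_modify (h : PySem.Dict String Int) (k : String) (f : Int → Int) (d : Char) :
    pvHave (PySem.Dict.modify h k 0 f) d =
      if String.ofList [d] = k then max (f (PySem.Dict.getD h k 0)) 0 else pvHave h d := by
  simp only [pvHave, PySem.Dict.getD_modify]
  split <;> rfl

theorem sum_map_congr {f g : Char → Int} :
    ∀ vs : List Char, (∀ v ∈ vs, f v = g v) → (vs.map f).sum = (vs.map g).sum := by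
  intro vs hfg
  induction vs with
  | nil => rfl
  | cons a t ih =>
    simp only [List.map_cons, List.sum_cons, hfg a List.mem_cons_self,
      ih (fun v hv => hfg v (List.mem_cons_of_mem _ hv))]

theorem sum_map_bump {f g : Char → Int} (k : Int) :
    ∀ vs : List Char, vs.Nodup → ∀ c ∈ vs, f c = g c + k →
      (∀ v ∈ vs, v ≠ c → f v = g v) → (vs.map f).sum = (vs.map g).sum + k := by
  intro vs
  induction vs with
  | nil => intro _ c hc; exact absurd hc (List.not_mem_nil)
  | cons a t ih =>
    intro hnd c hc hck hother
    rcases List.mem_cons.mp hc with he | ht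
    · subst he
      have hrest : ∀ v ∈ t, f v = g v := by
        intro v hv
        exact hother v (List.mem_cons_of_mem _ hv)
          (fun hvc => (List.nodup_cons.mp hnd).1 (hvc ▸ hv))
      simp only [List.map_cons, List.sum_cons, hck, sum_map_congr t hrest]
      ring
    · have hac : a ≠ c := fun he => (List.nodup_cons.mp hnd).1 (he ▸ ht)
      simp only [List.map_cons, List.sum_cons, hother a List.mem_cons_self hac,
        ih (List.nodup_cons.mp hnd).2 c ht hck
          (fun v hv hvc => hother v (List.mem_cons_of_mem _ hv) hvc)]
      ring

theorem sum_map_ge {f : Char → Int} :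
    ∀ vs : List Char, (∀ v ∈ vs, 0 ≤ f v) → ∀ c ∈ vs, f c ≤ (vs.map f).sum := by
  intro vs hpos c hc
  induction vs with
  | nil => exact absurd hc (List.not_mem_nil)
  | cons a t ih =>
    have hts : (0 : Int) ≤ (t.map f).sum :=
      List.sum_nonneg (by
        intro x hx
        obtain ⟨v, hv, rfl⟩ := List.mem_map.mp hx
        exact hpos v (List.mem_cons_of_mem _ hv))
    rcases List.mem_cons.mp hc with he | ht
    · subst he
      simp only [List.map_cons, List.sum_cons]
      omega
    · have := ih (fun v hv => hpos v (List.mem_cons_of_mem _ hv)) ht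
      have ha := hpos a List.mem_cons_self
      simp only [List.map_cons, List.sum_cons]
      omega

theorem term_nonneg (l : List Char) (h : PySem.Dict String Int) (v : Char) :
    0 ≤ max ((l.count v : Int) - pvHave h v) 0 := le_max_right _ _

theorem vowel_ne_star {v : Char} (hv : v ∈ pvVowels) : v ≠ '*' := by
  fin_cases hv <;> decide

theorem wild_nonneg (l : List Char) (h : PySem.Dict String Int) :
    (l.count '*' : Int) ≤ pvWild l h := by
  rw [pvWild_sum]
  have := List.sum_nonneg (l := pvVowels.map (fun v => max ((l.count v : Int) - pvHave h v) 0))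
    (by
      intro x hx
      obtain ⟨v, hv, rfl⟩ := List.mem_map.mp hx
      exact term_nonneg l h v)
  omega

theorem altCore_iff (l : List Char) (h : PySem.Dict String Int) :
    pvAltCore l h = true ↔ pvGood l h := by
  unfold pvAltCore pvGood
  by_cases hany : ((PySem.Set.ofList l).any (fun c =>
      c != '*' && !(pvVowels.contains c) && ((l.count c : Int) > pvHave h c))) = true
  · rw [if_pos hany]
    simp only [Bool.false_eq_true, false_iff, not_and]
    rw [List.any_eq_true] at hany
    obtain ⟨c, hc, hp⟩ := hany
    rw [PySem.Set.mem_ofList] at hc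
    simp only [Bool.and_eq_true, bne_iff_ne, Bool.not_eq_true', decide_eq_true_iff] at hp
    obtain ⟨⟨hne, hnv⟩, hcnt⟩ := hp
    intro hall
    exact absurd (hall c hc (by simpa using hnv) hne) (by omega)
  · rw [if_neg hany]
    rw [Bool.not_eq_true, List.any_eq_false] at hany
    have hall : ∀ c ∈ l, c ∉ pvVowels → c ≠ '*' → ((l.count c : Int)) ≤ pvHave h c := by
      intro c hc hnv hne
      have := hany c (by rw [PySem.Set.mem_ofList]; exact hc)
      simp only [Bool.and_eq_true, bne_iff_ne, Bool.not_eq_true', decide_eq_true_iff,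
        not_and] at this
      by_contra hlt
      exact absurd (by omega : pvHave h c < (l.count c : Int))
        (by simpa [hne, hnv] using this)
    cases hstar : PySem.Dict.get? h "*" with
    | none =>
      have hg : PySem.Dict.getD h "*" 0 = 0 := by
        rw [PySem.Dict.getD_eq_get?_getD, hstar]; rfl
      have h0 := wild_nonneg l h
      have hc0 : (0 : Int) ≤ (l.count '*' : Int) := by positivity
      simp only [hg, beq_iff_eq]
      constructor
      · intro hw
        exact ⟨hall, le_of_eq hw⟩
      · rintro ⟨-, hw⟩
        omega
    | some star =>
      have hg : PySem.Dict.getD h "*" 0 = star := by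
        rw [PySem.Dict.getD_eq_get?_getD, hstar]; rfl
      simp only [hg, decide_eq_true_iff]
      exact ⟨fun hw => ⟨hall, hw⟩, fun hp => hp.2⟩

-- the consonant clause under consuming a literal letter c
theorem consClause_self (c : Char) (l : List Char) (h : PySem.Dict String Int)
    (hv : 0 < PySem.Dict.getD h (String.ofList [c]) 0) :
    (∀ d ∈ c :: l, d ∉ pvVowels → d ≠ '*' → (((c :: l).count d : Int)) ≤ pvHave h d) ↔
    (∀ d ∈ l, d ∉ pvVowels → d ≠ '*' →
      ((l.count d : Int)) ≤ pvHave (PySem.Dict.modify h (String.ofList [c]) 0 (· - 1)) d) := by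
  constructor
  · intro H d hd hnv hne
    rw [pvHave_modify]
    by_cases hdc : d = c
    · subst hdc
      have := H d List.mem_cons_self hnv hne
      rw [List.count_cons_self] at this
      simp only [pvHave] at this
      rw [if_pos rfl]
      push_cast at this
      omega
    · have := H d (List.mem_cons_of_mem _ hd) hnv hne
      rw [cnt_ne l hdc] at this
      rw [if_neg (fun he => hdc (str1_inj.mp he))]
      exact this
  · intro H d hd hnv hne
    by_cases hdc : d = c
    · subst hdc
      have hcl : ((l.count d : Int)) ≤ max (PySem.Dict.getD h (String.ofList [d]) 0 - 1) 0 := by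
        by_cases hdl : d ∈ l
        · have := H d hdl hnv hne
          rw [pvHave_modify, if_pos rfl] at this
          exact this
        · simp [List.count_eq_zero_of_not_mem hdl]
      rw [List.count_cons_self]
      simp only [pvHave]
      push_cast
      omega
    · rcases List.mem_cons.mp hd with he | hdl
      · exact absurd he hdc
      · have := H d hdl hnv hne
        rw [pvHave_modify, if_neg (fun he => hdc (str1_inj.mp he))] at this
        rw [cnt_ne l hdc]
        exact this

-- the consonant clause under consuming a wildcard for a vowel c
theorem consClause_star (c : Char) (l : List Char) (h : PySem.Dict String Int)
    (hcv : c ∈ pvVowels) :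
    (∀ d ∈ c :: l, d ∉ pvVowels → d ≠ '*' → (((c :: l).count d : Int)) ≤ pvHave h d) ↔
    (∀ d ∈ l, d ∉ pvVowels → d ≠ '*' →
      ((l.count d : Int)) ≤ pvHave (PySem.Dict.modify h "*" 0 (· - 1)) d) := by
  have key : ∀ d : Char, d ≠ '*' →
      pvHave (PySem.Dict.modify h "*" 0 (· - 1)) d = pvHave h d := by
    intro d hne
    rw [pvHave_modify, if_neg (str1_ne_star hne)]
  constructor
  · intro H d hd hnv hne
    have hdc : d ≠ c := fun he => hnv (he ▸ hcv)
    have := H d (List.mem_cons_of_mem _ hd) hnv hne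
    rw [cnt_ne l hdc] at this
    rw [key d hne]
    exact this
  · intro H d hd hnv hne
    have hdc : d ≠ c := fun he => hnv (he ▸ hcv)
    rcases List.mem_cons.mp hd with he | hdl
    · exact absurd he hdc
    · have := H d hdl hnv hne
      rw [key d hne] at this
      rw [cnt_ne l hdc]
      exact this

-- wild under consuming a literal letter c with positive count
theorem wild_self (c : Char) (l : List Char) (h : PySem.Dict String Int)
    (hv : 0 < PySem.Dict.getD h (String.ofList [c]) 0) :
    pvWild (c :: l) h =
      pvWild l (PySem.Dict.modify h (String.ofList [c]) 0 (· - 1)) +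
        (if c = '*' then 1 else 0) := by
  have hother : ∀ v ∈ pvVowels, v ≠ c →
      max (((c :: l).count v : Int) - pvHave h v) 0 =
      max ((l.count v : Int) - pvHave (PySem.Dict.modify h (String.ofList [c]) 0 (· - 1)) v) 0 := by
    intro v _ hvc
    rw [cnt_ne l hvc, pvHave_modify, if_neg (fun he => hvc (str1_inj.mp he))]
  rw [pvWild_sum, pvWild_sum]
  by_cases hst : c = '*'
  · subst hst
    rw [List.count_cons_self,
      sum_map_congr pvVowels (fun v hv => hother v hv (vowel_ne_star hv))]
    push_cast
    ring
  · rw [cnt_ne l (fun he : '*' = c => hst he.symm), if_neg hst]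
    by_cases hcv : c ∈ pvVowels
    · have hall : ∀ v ∈ pvVowels,
          max (((c :: l).count v : Int) - pvHave h v) 0 =
          max ((l.count v : Int) - pvHave (PySem.Dict.modify h (String.ofList [c]) 0 (· - 1)) v) 0 := by
        intro v hvv
        by_cases hvc : v = c
        · subst hvc
          rw [List.count_cons_self, pvHave_modify, if_pos rfl]
          simp only [pvHave]
          push_cast
          omega
        · exact hother v hvv hvc
      rw [sum_map_congr pvVowels hall]
      ring
    · rw [sum_map_congr pvVowels (fun v hvv =>
        hother v hvv (fun he => hcv (he ▸ hvv)))]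
      ring

-- wild under consuming a wildcard for a vowel c whose own count is exhausted
theorem wild_star (c : Char) (l : List Char) (h : PySem.Dict String Int)
    (hv : PySem.Dict.getD h (String.ofList [c]) 0 ≤ 0) (hcv : c ∈ pvVowels) :
    pvWild (c :: l) h = pvWild l (PySem.Dict.modify h "*" 0 (· - 1)) + 1 := by
  have key : ∀ d : Char, d ≠ '*' →
      pvHave (PySem.Dict.modify h "*" 0 (· - 1)) d = pvHave h d := by
    intro d hne
    rw [pvHave_modify, if_neg (str1_ne_star hne)]
  have hcs : c ≠ '*' := vowel_ne_star hcv
  have hbump : max (((c :: l).count c : Int) - pvHave h c) 0 =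
      max ((l.count c : Int) - pvHave (PySem.Dict.modify h "*" 0 (· - 1)) c) 0 + 1 := by
    rw [List.count_cons_self, key c hcs]
    have hh : pvHave h c = 0 := by simp only [pvHave]; omega
    rw [hh]
    push_cast
    omega
  have hoth : ∀ v ∈ pvVowels, v ≠ c →
      max (((c :: l).count v : Int) - pvHave h v) 0 =
      max ((l.count v : Int) - pvHave (PySem.Dict.modify h "*" 0 (· - 1)) v) 0 := by
    intro v hvv hvc
    rw [cnt_ne l hvc, key v (vowel_ne_star hvv)]
  rw [pvWild_sum, pvWild_sum, cnt_ne l (fun he : '*' = c => hcs he.symm),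
    sum_map_bump 1 pvVowels (by decide) c hcv hbump hoth]
  ring

theorem good_step_self (c : Char) (l : List Char) (h : PySem.Dict String Int)
    (hv : 0 < PySem.Dict.getD h (String.ofList [c]) 0) :
    pvGood (c :: l) h ↔ pvGood l (PySem.Dict.modify h (String.ofList [c]) 0 (· - 1)) := by
  unfold pvGood
  apply and_congr (consClause_self c l h hv)
  rw [wild_self c l h hv]
  by_cases hst : c = '*'
  · subst hst
    rw [star_str] at hv ⊢
    rw [PySem.Dict.getD_modify]
    simp only [if_true]
    omega
  · have hs : ("*" : String) ≠ String.ofList [c] :=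
      fun hh => (str1_ne_star hst) hh.symm
    rw [PySem.Dict.getD_modify, if_neg hs, if_neg hst]
    omega

theorem good_step_star (c : Char) (l : List Char) (h : PySem.Dict String Int)
    (hv : PySem.Dict.getD h (String.ofList [c]) 0 ≤ 0) (hcv : c ∈ pvVowels) :
    pvGood (c :: l) h ↔ pvGood l (PySem.Dict.modify h "*" 0 (· - 1)) := by
  unfold pvGood
  apply and_congr (consClause_star c l h hcv)
  rw [wild_star c l h hv hcv, PySem.Dict.getD_modify, if_pos rfl]
  omega

theorem good_fail (c : Char) (l : List Char) (h : PySem.Dict String Int)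
    (hv : PySem.Dict.getD h (String.ofList [c]) 0 ≤ 0)
    (hno : ¬((PySem.Dict.get? h "*").isSome = true ∧ c ∈ pvVowels)) :
    ¬ pvGood (c :: l) h := by
  rintro ⟨hcons, hwild⟩
  by_cases hcv : c ∈ pvVowels
  · -- then '*' is absent from the hand
    have hstar : PySem.Dict.get? h "*" = none := by
      cases hs : PySem.Dict.get? h "*" with
      | none => rfl
      | some v => exact absurd ⟨by rw [hs]; rfl, hcv⟩ hno
    have hg : PySem.Dict.getD h "*" 0 = 0 := by
      rw [PySem.Dict.getD_eq_get?_getD, hstar]; rfl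
    rw [hg, pvWild_sum] at hwild
    have hc0 : (0 : Int) ≤ ((c :: l).count '*' : Int) := by positivity
    have hterm : (1 : Int) ≤ max (((c :: l).count c : Int) - pvHave h c) 0 := by
      have hh : pvHave h c = 0 := by simp only [pvHave]; omega
      rw [hh, List.count_cons_self]
      push_cast
      omega
    have hge := sum_map_ge (f := fun v => max (((c :: l).count v : Int) - pvHave h v) 0)
      pvVowels (fun v _ => term_nonneg (c :: l) h v) c hcv
    simp only at hge
    omega
  · by_cases hst : c = '*'
    · subst hst
      have hw := wild_nonneg ('*' :: l) h
      have hg : PySem.Dict.getD h "*" 0 ≤ 0 := by rwa [star_str] at hv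
      have hcnt : (1 : Int) ≤ (('*' :: l).count '*' : Int) := by
        rw [List.count_cons_self]; push_cast; omega
      omega
    · have hle := hcons c List.mem_cons_self hcv hst
      have hhc : pvHave h c = 0 := by simp only [pvHave]; omega
      rw [hhc, List.count_cons_self] at hle
      have : (0 : Int) ≤ (l.count c : Int) := by positivity
      push_cast at hle
      omega

theorem wild_nil (h : PySem.Dict String Int) : pvWild [] h = 0 := by
  rw [pvWild_sum]
  rw [sum_map_congr (g := fun _ => (0 : Int)) pvVowels (by
    intro v _
    have : (0:Int) ≤ pvHave h v := le_max_right _ _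
    simp only [List.count_nil]
    push_cast
    omega)]
  simp

theorem main_loop_eq : ∀ (l : List Char) (h : PySem.Dict String Int),
    (match pvLoopA l h with
     | none => false
     | some h' => !(PySem.Dict.getD h' "*" 0 < 0)) = pvAltCore l h := by
  intro l
  induction l with
  | nil =>
    intro h
    simp only [pvLoopA]
    apply bool_eq_of_iff
    rw [altCore_iff]
    unfold pvGood
    simp only [List.not_mem_nil, false_implies, implies_true, true_and, wild_nil,
      Bool.not_eq_eq_eq_not, Bool.not_true, decide_eq_false_iff_not, not_lt]
  | cons c rest ih =>
    intro h
    simp only [pvLoopA]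
    by_cases hv : PySem.Dict.getD h (String.ofList [c]) 0 > 0
    · rw [if_pos hv, ih]
      apply bool_eq_of_iff
      rw [altCore_iff, altCore_iff]
      exact (good_step_self c rest h hv).symm
    · rw [if_neg hv]
      by_cases hwc : (PySem.Dict.get? h "*").isSome = true ∧ c ∈ pvVowels
      · have hb : ((PySem.Dict.get? h "*").isSome && pvVowels.contains c) = true := by
          simp only [Bool.and_eq_true]
          exact ⟨hwc.1, by simpa using hwc.2⟩
        rw [if_pos hb, ih]
        apply bool_eq_of_iff
        rw [altCore_iff, altCore_iff]
        exact (good_step_star c rest h (by omega) hwc.2).symm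
      · have hb : ¬(((PySem.Dict.get? h "*").isSome && pvVowels.contains c) = true) := by
          simp only [Bool.and_eq_true]
          intro hpair
          exact hwc ⟨hpair.1, by simpa using hpair.2⟩
        rw [if_neg hb]
        symm
        rw [Bool.eq_false_iff]
        intro ht
        exact good_fail c rest h (by omega) hwc ((altCore_iff (c :: rest) h).mp ht)

-- ===== VERDICT (by name: the statement is the Claim_ definition above) =====
theorem can_be_formed_with_wildcard_spec : Claim_equal_can_be_formed_with_wildcard := by
  intro word hand _
  unfold Spec_can_be_formed_with_wildcard can_be_formed_with_wildcard can_be_formed_with_wildcard_alt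
  exact main_loop_eq word.toList (PySem.Dict.mk hand)
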